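-- pv_equiv track=rewrite | github.com/Devashish-Mishra-2003/NovusAI_Backend | app/agents/literature.py | _classify_study_design
-- ===== SOURCE A (Python) =====
-- from typing import Optional, Dict, Any, List, Literal
--
-- def _classify_study_design(article_types: List[str]) -> str:
--     types = [t.lower() for t in article_types]
--     if any("meta-analysis" in t for t in types):
--         return "META_ANALYSIS"
--     if any("systematic review" in t for t in types):
--         return "SYSTEMATIC_REVIEW"
--     if any("randomized" in t or "clinical trial" in t for t in types):
--         return "RCT_OR_TRIAL"
--     if any("cohort" in t or "case-control" in t or "observational" in t for t in types):
--         return "OBSERVATIONAL"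
--     if any("case report" in t for t in types):
--         return "CASE_REPORT"
--     return "OTHER"
-- ===== SOURCE B (Python) =====
-- _TABLE = [
--     ("META_ANALYSIS", ("meta-analysis",)),
--     ("SYSTEMATIC_REVIEW", ("systematic review",)),
--     ("RCT_OR_TRIAL", ("randomized", "clinical trial")),
--     ("OBSERVATIONAL", ("cohort", "case-control", "observational")),
--     ("CASE_REPORT", ("case report",)),
-- ]
--
-- def _classify_study_design(article_types):
--     best = len(_TABLE)
--     for raw in article_types:
--         t = raw.lower()
--         for i, (_, kws) in enumerate(_TABLE):
--             if i >= best: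
--                 break
--             if any(k in t for k in kws):
--                 best = i
--                 break
--     return _TABLE[best][0] if best < len(_TABLE) else "OTHER"
-- ===== Notes on version B (the rewrite author's own statement) =====
-- stated objective: alternative
-- what changed: Replaced A's five separate priority-ordered any-scans over the whole list with an ordered (label, keywords) table and a single pass that tracks the minimal matching table index per string, returning the label at the overall minimum.
import Mathlib
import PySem

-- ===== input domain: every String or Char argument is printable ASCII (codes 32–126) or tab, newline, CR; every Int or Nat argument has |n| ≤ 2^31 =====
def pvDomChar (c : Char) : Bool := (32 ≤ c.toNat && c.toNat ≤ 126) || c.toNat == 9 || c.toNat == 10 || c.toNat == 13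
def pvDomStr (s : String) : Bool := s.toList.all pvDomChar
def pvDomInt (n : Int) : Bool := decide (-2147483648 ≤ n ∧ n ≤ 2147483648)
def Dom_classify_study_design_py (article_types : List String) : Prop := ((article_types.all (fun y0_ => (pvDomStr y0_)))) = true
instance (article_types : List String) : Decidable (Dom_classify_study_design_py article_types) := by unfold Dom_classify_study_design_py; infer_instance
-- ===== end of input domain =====

-- B replaces A's five priority-ordered `any` scans with one pass over the inputs that tracks the
-- minimal matching index in an ordered (label, keywords) table (objective: alternative decomposition).


-- ===== PORT A =====
def classify_study_design_py (article_types : List String) : String :=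
  let types := article_types.map (fun t => PySem.Str.lower t)
  if types.any (fun t => PySem.Str.isIn "meta-analysis" t) then "META_ANALYSIS"
  else if types.any (fun t => PySem.Str.isIn "systematic review" t) then "SYSTEMATIC_REVIEW"
  else if types.any (fun t => PySem.Str.isIn "randomized" t || PySem.Str.isIn "clinical trial" t) then "RCT_OR_TRIAL"
  else if types.any (fun t => PySem.Str.isIn "cohort" t || PySem.Str.isIn "case-control" t || PySem.Str.isIn "observational" t) then "OBSERVATIONAL"
  else if types.any (fun t => PySem.Str.isIn "case report" t) then "CASE_REPORT"
  else "OTHER"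

-- ===== PORT B =====
def pvTable : List (String × List String) :=
  [("META_ANALYSIS", ["meta-analysis"]),
   ("SYSTEMATIC_REVIEW", ["systematic review"]),
   ("RCT_OR_TRIAL", ["randomized", "clinical trial"]),
   ("OBSERVATIONAL", ["cohort", "case-control", "observational"]),
   ("CASE_REPORT", ["case report"])]

-- inner loop of Source B: walk the table with index i, stop at i ≥ best, return i on first keyword hit
def pvScan : List (String × List String) → Nat → String → Nat → Nat
  | [], _, _, best => best
  | (_, kws) :: rest, i, t, best =>
    if best ≤ i then best
    else if kws.any (fun k => PySem.Str.isIn k t) then i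
    else pvScan rest (i + 1) t best

def classify_study_design_py_alt (article_types : List String) : String :=
  let best := article_types.foldl (fun best raw => pvScan pvTable 0 (PySem.Str.lower raw) best) pvTable.length
  if best < pvTable.length then ((pvTable.map Prod.fst).getD best "OTHER") else "OTHER"

-- ===== PRECONDITION & SPEC =====
def Spec_classify_study_design_py (article_types : List String) (out : String) : Prop := out = classify_study_design_py_alt article_types
instance (article_types : List String) (out : String) : Decidable (Spec_classify_study_design_py article_types out) := by unfold Spec_classify_study_design_py; infer_instance

-- ===== CLAIM (what is proved, stated in full; the proofs are below) =====
def Claim_equal_classify_study_design_py : Prop := ∀ (article_types : List String), Dom_classify_study_design_py article_types → Spec_classify_study_design_py article_types (classify_study_design_py article_types)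

-- ===== LEMMAS AND PROOFS =====

-- first matching index of a (lowered) string in the full table, 5 if none
def pvIdx (t : String) : Nat := pvScan pvTable 0 t 5

def pvM0 (t : String) : Bool := PySem.Str.isIn "meta-analysis" t
def pvM1 (t : String) : Bool := PySem.Str.isIn "systematic review" t
def pvM2 (t : String) : Bool := PySem.Str.isIn "randomized" t || PySem.Str.isIn "clinical trial" t
def pvM3 (t : String) : Bool := PySem.Str.isIn "cohort" t || PySem.Str.isIn "case-control" t || PySem.Str.isIn "observational" t
def pvM4 (t : String) : Bool := PySem.Str.isIn "case report" t

-- priority chain: first true index among five flags, 5 if none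
def pvPr (a b c d e : Bool) : Nat :=
  if a then 0 else if b then 1 else if c then 2 else if d then 3 else if e then 4 else 5

theorem pvPr_min (a b c d e a' b' c' d' e' : Bool) :
    min (pvPr a b c d e) (pvPr a' b' c' d' e') = pvPr (a || a') (b || b') (c || c') (d || d') (e || e') := by
  revert a b c d e a' b' c' d' e'; decide

theorem pvIdx_eq (t : String) :
    pvIdx t = pvPr (pvM0 t) (pvM1 t) (pvM2 t) (pvM3 t) (pvM4 t) := by
  simp only [pvPr]
  simp only [pvIdx, pvTable, pvScan, pvM0, pvM1, pvM2, pvM3, pvM4,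
    List.any_cons, List.any_nil, Bool.or_false, Bool.or_assoc]
  split_ifs <;> omega

theorem pvScan_min (t : String) (best : Nat) (h : best ≤ 5) :
    pvScan pvTable 0 t best = min best (pvIdx t) := by
  rw [pvIdx_eq]
  simp only [pvPr, pvTable, pvScan, pvM0, pvM1, pvM2, pvM3, pvM4,
    List.any_cons, List.any_nil, Bool.or_false, Bool.or_assoc]
  split_ifs <;> omega

theorem pvFold_eq (l : List String) (best : Nat) (h : best ≤ 5) :
    l.foldl (fun best raw => pvScan pvTable 0 (PySem.Str.lower raw) best) best
      = l.foldl (fun b raw => min b (pvIdx (PySem.Str.lower raw))) best := by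
  induction l generalizing best with
  | nil => rfl
  | cons t l ih =>
    simp only [List.foldl_cons, pvScan_min _ _ h]
    exact ih _ (le_trans (Nat.min_le_left _ _) h)

theorem pvFold_priority (l : List String) (b : Nat) (hb : b ≤ 5) :
    l.foldl (fun b raw => min b (pvIdx (PySem.Str.lower raw))) b
      = min b (pvPr (l.any (fun t => pvM0 (PySem.Str.lower t)))
          (l.any (fun t => pvM1 (PySem.Str.lower t)))
          (l.any (fun t => pvM2 (PySem.Str.lower t)))
          (l.any (fun t => pvM3 (PySem.Str.lower t)))
          (l.any (fun t => pvM4 (PySem.Str.lower t)))) := by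
  induction l generalizing b with
  | nil => simp only [List.foldl_nil, List.any_nil, pvPr, if_neg Bool.false_ne_true]; omega
  | cons t l ih =>
    rw [List.foldl_cons, ih _ (le_trans (Nat.min_le_left _ _) hb), pvIdx_eq,
      Nat.min_assoc, pvPr_min]
    simp only [List.any_cons]

theorem pvMin5_pr (a b c d e : Bool) : min 5 (pvPr a b c d e) = pvPr a b c d e := by
  revert a b c d e; decide

theorem classify_study_design_py_spec : Claim_equal_classify_study_design_py := by
  intro l _
  unfold Spec_classify_study_design_py classify_study_design_py classify_study_design_py_alt
  rw [pvFold_eq l pvTable.length (by simp [pvTable]), show pvTable.length = 5 from rfl,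
    pvFold_priority l 5 (le_refl 5), pvMin5_pr]
  simp only [List.any_map, Function.comp_def, pvM0, pvM1, pvM2, pvM3, pvM4]
  by_cases h0 : l.any (fun t => PySem.Str.isIn "meta-analysis" (PySem.Str.lower t)) <;>
  by_cases h1 : l.any (fun t => PySem.Str.isIn "systematic review" (PySem.Str.lower t)) <;>
  by_cases h2 : l.any (fun t => PySem.Str.isIn "randomized" (PySem.Str.lower t) || PySem.Str.isIn "clinical trial" (PySem.Str.lower t)) <;>
  by_cases h3 : l.any (fun t => PySem.Str.isIn "cohort" (PySem.Str.lower t) || PySem.Str.isIn "case-control" (PySem.Str.lower t) || PySem.Str.isIn "observational" (PySem.Str.lower t)) <;>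
  by_cases h4 : l.any (fun t => PySem.Str.isIn "case report" (PySem.Str.lower t)) <;>
    simp only [h0, h1, h2, h3, h4, pvPr, pvTable, if_true, if_false,
      Bool.false_eq_true, List.map_cons, List.map_nil, List.getD] <;> rfl
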